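-- pv_equiv track=rewrite | github.com/exaloop/codon | bench/codon/binary_trees.py | get_argchunks
-- ===== SOURCE A (Python) =====
-- def get_argchunks(i, d, chunksize=5000):
--     assert chunksize % 2 == 0
--     chunk = []
--     for k in range(1, i + 1):
--         chunk.append((k, d))
--         if len(chunk) == chunksize:
--             yield chunk
--             chunk = []
--     if len(chunk) > 0:
--         yield chunk
-- ===== SOURCE B (Python) =====
-- def get_argchunks(i, d, chunksize=5000):
--     assert chunksize % 2 == 0
--     for start in range(1, i + 1, chunksize):
--         yield [(k, d) for k in range(start, min(start + chunksize, i + 1))]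
-- ===== Notes on version B (the rewrite author's own statement) =====
-- stated objective: simpler
-- what changed: B drops A's element-by-element buffering and length test and instead computes each chunk's boundaries arithmetically, iterating over chunk start indices with a stepped range and emitting each chunk as a comprehension.
-- outside the precondition, e.g. on get_argchunks(3, 10, 0): A returns [[(1, 10), (2, 10), (3, 10)]], B raises ValueError; on get_argchunks(3, 10, -2): A returns [[(1, 10), (2, 10), (3, 10)]], B returns []
import Mathlib
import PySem

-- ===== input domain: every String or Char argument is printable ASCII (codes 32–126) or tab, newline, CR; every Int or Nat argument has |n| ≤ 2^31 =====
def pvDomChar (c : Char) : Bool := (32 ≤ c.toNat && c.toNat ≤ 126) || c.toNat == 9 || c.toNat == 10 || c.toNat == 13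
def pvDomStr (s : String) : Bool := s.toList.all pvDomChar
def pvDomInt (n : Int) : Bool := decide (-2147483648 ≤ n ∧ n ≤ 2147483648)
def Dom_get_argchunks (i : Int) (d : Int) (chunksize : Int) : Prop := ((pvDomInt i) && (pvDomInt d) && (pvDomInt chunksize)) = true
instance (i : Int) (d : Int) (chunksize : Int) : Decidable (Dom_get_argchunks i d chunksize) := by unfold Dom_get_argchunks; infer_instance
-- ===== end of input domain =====

-- B replaces A's buffer-and-length-test loop by direct arithmetic on chunk start indices (simpler decomposition).
-- (A is a generator; equivalence is about the list of yielded chunks.)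

-- ===== PORT A =====
def get_argchunks (i : Int) (d : Int) (chunksize : Int) : List (List (Int × Int)) :=
  let st := (PySem.List.pyRange 1 (i + 1) 1).foldl
    (fun (s : List (List (Int × Int)) × List (Int × Int)) k =>
      let chunk := s.2 ++ [(k, d)]
      if (chunk.length : Int) = chunksize then (s.1 ++ [chunk], []) else (s.1, chunk))
    ([], [])
  if st.2.length > 0 then st.1 ++ [st.2] else st.1

-- ===== PORT B =====
def get_argchunks_alt (i : Int) (d : Int) (chunksize : Int) : List (List (Int × Int)) :=
  (PySem.List.pyRange 1 (i + 1) chunksize).map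
    (fun start => (PySem.List.pyRange start (min (start + chunksize) (i + 1)) 1).map (fun k => (k, d)))

-- ===== PRECONDITION & SPEC =====
-- Pre_ excludes odd chunksize (A's assert raises AssertionError) and nonpositive even chunksize,
-- where A's single-oversized-chunk value is an accident of the never-firing length test and B's
-- stepped range raises (chunksize = 0) or yields nothing (chunksize < 0).
def Pre_get_argchunks (i : Int) (d : Int) (chunksize : Int) : Prop :=
  chunksize % 2 = 0 ∧ 0 < chunksize
instance (i : Int) (d : Int) (chunksize : Int) : Decidable (Pre_get_argchunks i d chunksize) := by unfold Pre_get_argchunks; infer_instance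

def pvWitness_get_argchunks : Int × Int × Int := (7, 0, 2)

def Spec_get_argchunks (i : Int) (d : Int) (chunksize : Int) (out : List (List (Int × Int))) : Prop := out = get_argchunks_alt i d chunksize
instance (i : Int) (d : Int) (chunksize : Int) (out : List (List (Int × Int))) : Decidable (Spec_get_argchunks i d chunksize out) := by unfold Spec_get_argchunks; infer_instance

-- ===== CLAIM (what is proved, stated in full; the proofs are below) =====
def Claim_equal_get_argchunks : Prop := ∀ (i : Int) (d : Int) (chunksize : Int), Dom_get_argchunks i d chunksize → Pre_get_argchunks i d chunksize → Spec_get_argchunks i d chunksize (get_argchunks i d chunksize)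

-- ===== LEMMAS AND PROOFS =====

-- pyRange with a positive step is empty when the bounds are degenerate
theorem pvRange_pos_nil {a b c : Int} (hc : 0 < c) (h : b ≤ a) :
    PySem.List.pyRange a b c = [] := by
  rw [PySem.List.pyRange_of_pos a b hc, if_neg (by omega)]
  simp

-- cons form of pyRange for a general positive step
theorem pvRange_pos_cons {a b c : Int} (hc : 0 < c) (h : a < b) :
    PySem.List.pyRange a b c = a :: PySem.List.pyRange (a + c) b c := by
  rw [PySem.List.pyRange_of_pos a b hc, PySem.List.pyRange_of_pos (a + c) b hc,
    if_pos h]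
  by_cases h2 : a + c < b
  · rw [if_pos h2]
    have key : ((b - a + c - 1) / c).toNat = ((b - (a + c) + c - 1) / c).toNat + 1 := by
      have heq : b - a + c - 1 = (b - (a + c) + c - 1) + 1 * c := by ring
      rw [heq, Int.add_mul_ediv_right _ _ (by omega : c ≠ 0)]
      have hnn : 0 ≤ (b - (a + c) + c - 1) / c := by
        apply Int.ediv_nonneg <;> omega
      omega
    rw [key, List.range_succ_eq_map, List.map_cons, List.map_map]
    congr 1
    · norm_num
    · apply List.map_congr_left
      intro k _
      simp only [Function.comp_apply, Nat.succ_eq_add_one]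
      push_cast
      ring
  · rw [if_neg h2]
    have key : ((b - a + c - 1) / c) = 1 := by
      rw [← PySem.Int.floordiv_eq_ediv_of_pos hc,
        PySem.Int.floordiv_eq_iff_of_pos hc]
      constructor <;> omega
    rw [key]
    simp

-- length of a step-1 range, cast to Int
theorem pvLen1 (a b : Int) (h : a ≤ b) :
    ((PySem.List.pyRange a b 1).length : Int) = b - a := by
  rw [PySem.List.length_pyRange_one]
  omega

-- a step-1 range with room is nonempty
theorem pvNe1 (a b : Int) (h : a < b) : PySem.List.pyRange a b 1 ≠ [] := by
  intro hnil
  have hl := PySem.List.length_pyRange_one a b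
  rw [hnil] at hl
  simp at hl
  omega

-- the loop body of A's port, with the ambient d and chunksize fixed
def pvStep (d c : Int) (s : List (List (Int × Int)) × List (Int × Int)) (k : Int) :
    List (List (Int × Int)) × List (Int × Int) :=
  let chunk := s.2 ++ [(k, d)]
  if (chunk.length : Int) = c then (s.1 ++ [chunk], []) else (s.1, chunk)

-- while the buffer cannot reach length c, the loop only appends to the buffer
theorem pvFill (d c : Int) :
    ∀ (l : List Int) (acc : List (List (Int × Int))) (ch : List (Int × Int)),
      ((ch.length : Int) + l.length < c) →
      l.foldl (pvStep d c) (acc, ch) = (acc, ch ++ l.map (fun k => (k, d))) := by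
  intro l
  induction l with
  | nil => intro acc ch _; simp
  | cons x xs ih =>
    intro acc ch h
    simp only [List.foldl_cons, pvStep]
    rw [if_neg (by simp at h ⊢; omega)]
    rw [ih acc (ch ++ [(x, d)]) (by simp at h ⊢; omega)]
    simp

-- when the buffer reaches length c exactly at the last element, one chunk is emitted
theorem pvFull (d c : Int) :
    ∀ (l : List Int) (acc : List (List (Int × Int))) (ch : List (Int × Int)),
      l ≠ [] → ((ch.length : Int) + l.length = c) →
      l.foldl (pvStep d c) (acc, ch) = (acc ++ [ch ++ l.map (fun k => (k, d))], []) := by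
  intro l
  induction l with
  | nil => intro _ _ h; exact absurd rfl h
  | cons x xs ih =>
    intro acc ch _ h
    simp only [List.foldl_cons, pvStep]
    by_cases hx : xs = []
    · subst hx
      rw [if_pos (by simp at h ⊢; omega)]
      simp
    · rw [if_neg (by simp at h ⊢; have := List.length_pos_iff.mpr hx; omega)]
      rw [ih acc (ch ++ [(x, d)]) hx (by simp at h ⊢; omega)]
      simp

-- main invariant: finalizing A's loop run from start with an empty buffer produces
-- exactly B's arithmetically-computed chunks from start
theorem pvMain (d c e : Int) (hc : 0 < c) :
    ∀ (n : Nat) (start : Int) (acc : List (List (Int × Int))),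
      (e - start).toNat = n →
      (let st := (PySem.List.pyRange start e 1).foldl (pvStep d c) (acc, []);
       if st.2.length > 0 then st.1 ++ [st.2] else st.1) =
      acc ++ (PySem.List.pyRange start e c).map
        (fun s0 => (PySem.List.pyRange s0 (min (s0 + c) e) 1).map (fun k => (k, d))) := by
  intro n
  induction n using Nat.strong_induction_on with
  | _ n ih =>
    intro start acc hn
    by_cases he : e ≤ start
    · rw [PySem.List.pyRange_one_eq_nil he, pvRange_pos_nil hc he]
      simp
    · push_neg at he
      by_cases hbig : start + c < e
      · -- a full chunk [start, start+c) then recurse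
        rw [pvRange_pos_cons hc (by omega : start < e), List.map_cons,
          min_eq_left (by omega : start + c ≤ e)]
        rw [PySem.List.pyRange_one_append start (start + c) e (by omega) (by omega),
          List.foldl_append]
        rw [pvFull d c _ acc [] (pvNe1 _ _ (by omega))
          (by have hl := pvLen1 start (start + c) (by omega)
              simp only [List.length_nil, Nat.cast_zero, zero_add]; omega)]
        simp only [List.nil_append]
        rw [ih (e - (start + c)).toNat (by omega) (start + c) _ rfl]
        simp
      · -- last (possibly partial) chunk [start, e)
        push_neg at hbig
        rw [pvRange_pos_cons hc he, pvRange_pos_nil hc (by omega), List.map_cons,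
          List.map_nil, min_eq_right (by omega : e ≤ start + c)]
        by_cases hfull : start + c = e
        · rw [pvFull d c _ acc [] (pvNe1 _ _ he)
            (by have hl := pvLen1 start e (by omega)
                simp only [List.length_nil, Nat.cast_zero, zero_add]; omega)]
          simp
        · rw [pvFill d c _ acc []
            (by have hl := pvLen1 start e (by omega)
                simp only [List.length_nil, Nat.cast_zero, zero_add]; omega)]
          simp only [List.nil_append]
          rw [if_pos (by simp [PySem.List.length_pyRange_one]; omega)]

-- ===== VERDICT (by name: the statement is the Claim_ definition above) =====
theorem get_argchunks_spec : Claim_equal_get_argchunks := by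
  intro i d chunksize _ hpre
  show get_argchunks i d chunksize = get_argchunks_alt i d chunksize
  exact pvMain d chunksize (i + 1) hpre.2 ((i + 1) - 1).toNat 1 [] rfl
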